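-- pv_equiv track=rewrite | github.com/nermadie/CodeForces_Solutions | CodeforcesRound990Div2/prob03.py | solve
-- ===== SOURCE A (Python) =====
-- def solve(n, a1, a2):
--     max_remain = -100000
--     result = 0
--     for i in range(n):
--         if a1[i] > a2[i]:
--             result += a1[i]
--             max_remain = max(max_remain, a2[i])
--         else:
--             result += a2[i]
--             max_remain = max(max_remain, a1[i])
--     return result + max_remain
-- ===== SOURCE B (Python) =====
-- def solve(n, a1, a2):
--     cols = [(a1[i], a2[i]) for i in range(n)]
--     mins = [min(p, q) for p, q in cols]
--     return sum(p for p, _ in cols) + sum(q for _, q in cols) - sum(mins) + max(mins + [-100000])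
-- ===== Notes on version B (the rewrite author's own statement) =====
-- stated objective: alternative
-- what changed: Replaces the per-column branch-and-accumulate loop (running max-remain plus sum of column maxima) by an aggregate identity: sum of column maxima = sum of first coordinates + sum of second coordinates - sum of column minima, then adds max(minima + [-100000]).
import Mathlib
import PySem

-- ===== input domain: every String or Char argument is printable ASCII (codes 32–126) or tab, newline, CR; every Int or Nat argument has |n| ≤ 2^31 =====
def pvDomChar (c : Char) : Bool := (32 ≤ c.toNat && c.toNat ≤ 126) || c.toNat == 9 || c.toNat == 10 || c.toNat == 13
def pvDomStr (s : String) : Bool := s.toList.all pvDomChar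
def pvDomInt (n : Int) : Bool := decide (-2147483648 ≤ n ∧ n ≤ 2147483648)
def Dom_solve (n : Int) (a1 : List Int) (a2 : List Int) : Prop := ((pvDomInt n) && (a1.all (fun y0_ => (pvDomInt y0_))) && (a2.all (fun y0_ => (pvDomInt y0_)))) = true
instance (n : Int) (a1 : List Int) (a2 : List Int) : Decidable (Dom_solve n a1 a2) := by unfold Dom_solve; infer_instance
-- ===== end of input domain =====

-- B replaces A's branching loop by an aggregate identity over the first n columns
-- (sum a1 + sum a2 - sum of column minima + max of the minima with the -100000 floor); alternative decomposition, same cost.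

-- ===== PORT A =====
-- literal port of A's loop: state (max_remain, result), indexing via pyGetD (in range under Pre_solve)
def solve (n : Int) (a1 : List Int) (a2 : List Int) : Int :=
  let st := (PySem.List.pyRange 0 n 1).foldl (fun (st : Int × Int) i =>
    if PySem.List.pyGetD a1 i 0 > PySem.List.pyGetD a2 i 0 then
      (max st.1 (PySem.List.pyGetD a2 i 0), st.2 + PySem.List.pyGetD a1 i 0)
    else
      (max st.1 (PySem.List.pyGetD a1 i 0), st.2 + PySem.List.pyGetD a2 i 0)) ((-100000 : Int), (0 : Int))
  st.2 + st.1

-- ===== PORT B =====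
def solve_alt (n : Int) (a1 : List Int) (a2 : List Int) : Int :=
  let cols := (PySem.List.pyRange 0 n 1).map
    (fun i => (PySem.List.pyGetD a1 i 0, PySem.List.pyGetD a2 i 0))
  let mins := cols.map (fun p => min p.1 p.2)
  (cols.map (fun p => p.1)).sum + (cols.map (fun p => p.2)).sum - mins.sum
    + (PySem.List.max? (mins ++ [(-100000 : Int)]) (fun v => v)).getD 0

-- ===== PRECONDITION & SPEC =====
-- exactly A's domain: for n > len(a1) or n > len(a2) A raises IndexError; everywhere else it returns
def Pre_solve (n : Int) (a1 : List Int) (a2 : List Int) : Prop :=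
  n ≤ (a1.length : Int) ∧ n ≤ (a2.length : Int)
instance (n : Int) (a1 : List Int) (a2 : List Int) : Decidable (Pre_solve n a1 a2) := by unfold Pre_solve; infer_instance
def pvWitness_solve : Int × List Int × List Int := (2, [3, 1], [2, 5])

def Spec_solve (n : Int) (a1 : List Int) (a2 : List Int) (out : Int) : Prop := out = solve_alt n a1 a2
instance (n : Int) (a1 : List Int) (a2 : List Int) (out : Int) : Decidable (Spec_solve n a1 a2 out) := by unfold Spec_solve; infer_instance

-- ===== CLAIM (what is proved, stated in full; the proofs are below) =====
def Claim_equal_solve : Prop := ∀ (n : Int) (a1 : List Int) (a2 : List Int), Dom_solve n a1 a2 → Pre_solve n a1 a2 → Spec_solve n a1 a2 (solve n a1 a2)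

-- ===== LEMMAS AND PROOFS =====

-- pushing an extra operand through a running max
theorem foldl_max_shift (t : List Int) : ∀ (a b : Int), t.foldl max (max a b) = max (t.foldl max a) b := by
  induction t with
  | nil => intro a b; rfl
  | cons c t ih =>
    intro a b
    simp only [List.foldl_cons]
    have h : max (max a b) c = max (max a c) b := by omega
    rw [h, ih]

-- min+max column identity for equal-length lists
theorem zip_minmax_sum (x : List Int) : ∀ (y : List Int), x.length = y.length →
    (List.zipWith max x y).sum + (List.zipWith min x y).sum = x.sum + y.sum := by
  induction x with
  | nil => intro y hy; cases y <;> simp_all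
  | cons a x ih =>
    intro y hy
    cases y with
    | nil => simp at hy
    | cons b y =>
      simp only [List.zipWith_cons_cons, List.sum_cons]
      have := ih y (by simpa using hy)
      omega

theorem zip_map_min_eq_zipWith (x : List Int) : ∀ (y : List Int),
    (x.zip y).map (fun p => min p.1 p.2) = List.zipWith min x y := by
  induction x with
  | nil => intro y; simp
  | cons a x ih =>
    intro y
    cases y with
    | nil => simp
    | cons b y => simp [ih]

-- B's column list over range(k) is the zip of the two prefixes
theorem map_get_pyRange_zip (k : Nat) (a1 a2 : List Int) (hk1 : k ≤ a1.length) (hk2 : k ≤ a2.length) :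
    (PySem.List.pyRange 0 (k : Int) 1).map
      (fun i => (PySem.List.pyGetD a1 i 0, PySem.List.pyGetD a2 i 0))
    = (a1.take k).zip (a2.take k) := by
  induction k with
  | zero => simp
  | succ k ih =>
    have hk1' : k < a1.length := by omega
    have hk2' : k < a2.length := by omega
    have hsplit : PySem.List.pyRange 0 ((k + 1 : Nat) : Int) 1
        = PySem.List.pyRange 0 (k : Int) 1 ++ [(k : Int)] := by
      push_cast
      exact PySem.List.pyRange_one_succ_right (by positivity)
    have hg1 : PySem.List.pyGetD a1 (k : Int) 0 = a1[k] := by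
      rw [PySem.List.pyGetD_natCast]; simp [List.getD, hk1']
    have hg2 : PySem.List.pyGetD a2 (k : Int) 0 = a2[k] := by
      rw [PySem.List.pyGetD_natCast]; simp [List.getD, hk2']
    have ht1 : a1.take (k + 1) = a1.take k ++ [a1[k]] := by
      rw [List.take_add_one]; simp [List.getElem?_eq_getElem hk1']
    have ht2 : a2.take (k + 1) = a2.take k ++ [a2[k]] := by
      rw [List.take_add_one]; simp [List.getElem?_eq_getElem hk2']
    have hlen : (a1.take k).length = (a2.take k).length := by
      simp only [List.length_take]; omega
    rw [hsplit, List.map_append, ih (by omega) (by omega), ht1, ht2,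
      List.zip_append hlen]
    simp [hg1, hg2]

-- the loop of A computed over the first k columns
theorem solve_loop (k : Nat) (a1 a2 : List Int) (hk1 : k ≤ a1.length) (hk2 : k ≤ a2.length)
    (mr res : Int) :
    (PySem.List.pyRange 0 (k : Int) 1).foldl (fun (st : Int × Int) i =>
      if PySem.List.pyGetD a1 i 0 > PySem.List.pyGetD a2 i 0 then
        (max st.1 (PySem.List.pyGetD a2 i 0), st.2 + PySem.List.pyGetD a1 i 0)
      else
        (max st.1 (PySem.List.pyGetD a1 i 0), st.2 + PySem.List.pyGetD a2 i 0)) (mr, res)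
    = ((List.zipWith min (a1.take k) (a2.take k)).foldl max mr,
       res + (List.zipWith max (a1.take k) (a2.take k)).sum) := by
  induction k generalizing mr res with
  | zero => simp
  | succ k ih =>
    have hk1' : k < a1.length := by omega
    have hk2' : k < a2.length := by omega
    have hsplit : PySem.List.pyRange 0 ((k + 1 : Nat) : Int) 1
        = PySem.List.pyRange 0 (k : Int) 1 ++ [(k : Int)] := by
      push_cast
      exact PySem.List.pyRange_one_succ_right (by positivity)
    rw [hsplit, List.foldl_append, ih (by omega) (by omega)]
    have hg1 : PySem.List.pyGetD a1 (k : Int) 0 = a1[k] := by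
      rw [PySem.List.pyGetD_natCast]; simp [List.getD, hk1']
    have hg2 : PySem.List.pyGetD a2 (k : Int) 0 = a2[k] := by
      rw [PySem.List.pyGetD_natCast]; simp [List.getD, hk2']
    have ht1 : a1.take (k + 1) = a1.take k ++ [a1[k]] := by
      rw [List.take_add_one]; simp [List.getElem?_eq_getElem hk1']
    have ht2 : a2.take (k + 1) = a2.take k ++ [a2[k]] := by
      rw [List.take_add_one]; simp [List.getElem?_eq_getElem hk2']
    have hlen : (a1.take k).length = (a2.take k).length := by
      simp [hk1'.le, hk2'.le]
    rw [ht1, ht2, List.zipWith_append (h := hlen), List.zipWith_append (h := hlen)]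
    simp only [List.foldl_cons, List.foldl_append, List.zipWith_cons_cons, List.zipWith_nil_right,
      List.sum_append, List.sum_cons, List.sum_nil, List.foldl_nil, hg1, hg2]
    split_ifs with h
    · have hmin : min a1[k] a2[k] = a2[k] := by omega
      have hmax : max a1[k] a2[k] = a1[k] := by omega
      rw [hmin, hmax]
      simp only [Prod.mk.injEq, true_and]; ring
    · have hmin : min a1[k] a2[k] = a1[k] := by omega
      have hmax : max a1[k] a2[k] = a2[k] := by omega
      rw [hmin, hmax]
      simp only [Prod.mk.injEq, true_and]; ring

-- B's max(mins + [-100000]) equals A's running max seeded with -100000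
theorem max_append_sentinel (mins : List Int) :
    (PySem.List.max? (mins ++ [(-100000 : Int)]) (fun v => v)).getD 0
      = mins.foldl max (-100000) := by
  cases mins with
  | nil => simp [PySem.List.max?]
  | cons m t =>
    rw [List.cons_append, PySem.List.max?_id_cons]
    simp only [Option.getD_some, List.foldl_append, List.foldl_cons, List.foldl_nil]
    have h1 : t.foldl max (max (-100000) m) = max (t.foldl max (-100000)) m := foldl_max_shift t _ _
    have h2 : max (t.foldl max m) (-100000) = t.foldl max (max m (-100000)) := (foldl_max_shift t m (-100000)).symm
    have h3 : max m (-100000 : Int) = max (-100000 : Int) m := by omega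
    rw [h1, h2, h3, foldl_max_shift]

-- ===== VERDICT (by name: the statement is the Claim_ definition above) =====
theorem solve_spec : Claim_equal_solve := by
  intro n a1 a2 _hdom hpre
  obtain ⟨h1, h2⟩ := hpre
  by_cases hn : 0 ≤ n
  · obtain ⟨k, rfl⟩ : ∃ k : Nat, n = (k : Int) := ⟨n.toNat, by omega⟩
    unfold Spec_solve solve solve_alt
    rw [map_get_pyRange_zip k a1 a2 (by omega) (by omega)]
    rw [solve_loop k a1 a2 (by omega) (by omega)]
    have hlen : (a1.take k).length = (a2.take k).length := by
      simp only [List.length_take]; omega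
    have hf : ((a1.take k).zip (a2.take k)).map (fun p => p.1) = a1.take k :=
      List.map_fst_zip (le_of_eq hlen)
    have hs : ((a1.take k).zip (a2.take k)).map (fun p => p.2) = a2.take k :=
      List.map_snd_zip (le_of_eq hlen.symm)
    simp only [zip_map_min_eq_zipWith, max_append_sentinel, hf, hs]
    have := zip_minmax_sum (a1.take k) (a2.take k) hlen
    omega
  · unfold Spec_solve solve solve_alt
    rw [PySem.List.pyRange_one_eq_nil (by omega)]
    simp [PySem.List.max?]
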